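-- pv_equiv track=rewrite | github.com/ryboselm/Clock-Game | players/team_7.py | check_two_letter_constraint_viability
-- ===== SOURCE A (Python) =====
-- def check_two_letter_constraint_viability(constraint, state, territory):
--     """Checks the viability of satisfying a two-letter constraint given the current state and territory.
--
--     Args:
--         constraint (str): The constraint string to check, in the format "A<B".
--         state (list): The current state of the board, a list containing letters at each hour position.
--         territory (list): The current state of territory ownership.
--
--     Returns:
--         bool: True if it's viable to satisfy the constraint, otherwise False.
--
--     This method checks whether a two-letter constraint can be satisfied given the current state and available slots. It returns True if there is a viable option to play a card that satisfies the constraint, otherwise it returns False.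
--     """
--     list_of_letters = constraint.split("<")
--     letter_positions = [state.index(letter) if letter in state else None for letter in list_of_letters]
--     available_slots = [i for i, val in enumerate(territory) if val == 4]
--
--     if letter_positions[1] is None and letter_positions[0] is not None:
--         for slot in available_slots:
--             if 0 < (slot - letter_positions[0]) % 12 <= 5:
--                 return True
--     return False
-- ===== SOURCE B (Python) =====
-- def check_two_letter_constraint_viability(constraint, state, territory):
--     letters = constraint.split("<")
--     if letters[1] in state or letters[0] not in state:
--         return False
--     pos0 = state.index(letters[0])
--     for off in range(1, 6):
--         for slot in range((pos0 + off) % 12, len(territory), 12):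
--             if territory[slot] == 4:
--                 return True
--     return False
-- ===== Notes on version B (the rewrite author's own statement) =====
-- stated objective: alternative
-- what changed: Instead of building the list of all territory slots owned by player 4 and filtering it by a modular-distance test, B enumerates the 5 admissible offsets from the first letter's position and strides through territory with step 12, looking slots up directly.
import Mathlib
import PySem

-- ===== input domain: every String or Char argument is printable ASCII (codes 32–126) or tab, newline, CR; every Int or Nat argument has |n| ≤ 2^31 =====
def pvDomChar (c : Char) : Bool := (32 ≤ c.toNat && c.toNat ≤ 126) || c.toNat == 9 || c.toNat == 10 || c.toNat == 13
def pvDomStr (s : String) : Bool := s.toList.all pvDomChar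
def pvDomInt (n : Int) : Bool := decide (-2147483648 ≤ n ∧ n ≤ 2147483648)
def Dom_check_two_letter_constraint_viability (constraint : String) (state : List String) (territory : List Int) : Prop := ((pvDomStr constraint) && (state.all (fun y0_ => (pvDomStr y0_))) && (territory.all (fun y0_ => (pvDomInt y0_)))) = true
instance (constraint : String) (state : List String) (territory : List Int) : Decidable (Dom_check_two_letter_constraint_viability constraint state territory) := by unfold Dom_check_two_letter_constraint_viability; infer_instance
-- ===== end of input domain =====

-- B replaces A's scan of all of territory filtered by a modular-distance test with a direct
-- enumeration of the 5 admissible offsets and strided lookups into territory (alternative).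


-- ===== PORT A =====
def check_two_letter_constraint_viability (constraint : String) (state : List String) (territory : List Int) : Bool :=
  let list_of_letters : List String := (PySem.Chars.splitOn constraint.toList ['<']).map String.ofList
  let letter_positions : List (Option Nat) :=
    list_of_letters.map (fun letter => if state.contains letter then PySem.List.index? state letter else none)
  let available_slots : List Int :=
    (PySem.List.enumerate territory 0).filterMap (fun p => if p.2 == (4 : Int) then some p.1 else none)
  -- letter_positions[1] / letter_positions[0]: the IndexError case (pyGet? = none) is excluded by Pre_
  match PySem.List.pyGet? letter_positions 1, PySem.List.pyGet? letter_positions 0 with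
  | some none, some (some p0) =>
      available_slots.any (fun slot =>
        decide (0 < PySem.Int.mod (slot - (p0 : Int)) 12) && decide (PySem.Int.mod (slot - (p0 : Int)) 12 ≤ 5))
  | _, _ => false

-- ===== PORT B =====
def check_two_letter_constraint_viability_alt (constraint : String) (state : List String) (territory : List Int) : Bool :=
  let letters : List String := (PySem.Chars.splitOn constraint.toList ['<']).map String.ofList
  -- letters[1] / letters[0]: the IndexError case (pyGet? = none) is excluded by Pre_
  match PySem.List.pyGet? letters 1 with
  | none => false
  | some l1 =>
    match PySem.List.pyGet? letters 0 with
    | none => false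
    | some l0 =>
      if state.contains l1 || !state.contains l0 then false
      else
        match PySem.List.index? state l0 with
        | some pos0 =>
            (PySem.List.pyRange 1 6 1).any (fun off =>
              (PySem.List.pyRange (PySem.Int.mod ((pos0 : Int) + off) 12) (territory.length : Int) 12).any
                (fun slot => PySem.List.pyGet? territory slot == some (4 : Int)))
        | none => false

-- ===== PRECONDITION & SPEC =====
-- Pre_ excludes exactly the constraints containing no '<': there constraint.split("<") has a single
-- element and letter_positions[1] (resp. letters[1] in B) raises IndexError.
def Pre_check_two_letter_constraint_viability (constraint : String) (state : List String) (territory : List Int) : Prop :=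
  '<' ∈ constraint.toList
instance (constraint : String) (state : List String) (territory : List Int) : Decidable (Pre_check_two_letter_constraint_viability constraint state territory) := by unfold Pre_check_two_letter_constraint_viability; infer_instance
def pvWitness_check_two_letter_constraint_viability : String × List String × List Int := ("A<B", ["A"], [0, 4])

def Spec_check_two_letter_constraint_viability (constraint : String) (state : List String) (territory : List Int) (out : Bool) : Prop := out = check_two_letter_constraint_viability_alt constraint state territory
instance (constraint : String) (state : List String) (territory : List Int) (out : Bool) : Decidable (Spec_check_two_letter_constraint_viability constraint state territory out) := by unfold Spec_check_two_letter_constraint_viability; infer_instance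

-- ===== CLAIM (what is proved, stated in full; the proofs are below) =====
def Claim_equal_check_two_letter_constraint_viability : Prop := ∀ (constraint : String) (state : List String) (territory : List Int), Dom_check_two_letter_constraint_viability constraint state territory → Pre_check_two_letter_constraint_viability constraint state territory → Spec_check_two_letter_constraint_viability constraint state territory (check_two_letter_constraint_viability constraint state territory)

-- ===== LEMMAS AND PROOFS =====

-- splitting on a one-character separator yields 1 + (number of its occurrences) parts
theorem splitOn_go_length (c : Char) (l : List Char) : ∀ (fuel : Nat) (cur : List Char) (acc : List (List Char)), l.length < fuel →
    (PySem.Chars.splitOn.go [c] fuel l cur acc).length = acc.length + 1 + l.count c := by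
  induction l with
  | nil =>
    intro fuel cur acc hf
    cases fuel with
    | zero => omega
    | succ f => simp [PySem.Chars.splitOn.go]
  | cons hd tl ih =>
    intro fuel cur acc hf
    cases fuel with
    | zero => simp at hf
    | succ f =>
      rw [PySem.Chars.splitOn.go]
      by_cases hc : c = hd
      · subst hc
        have hpre : [c].isPrefixOf (c :: tl) = true := by simp [List.isPrefixOf]
        rw [hpre]
        simp only [if_true]
        simp only [List.length_cons, List.length_nil, List.drop_succ_cons, List.drop_zero]
        rw [ih f [] (cur.reverse :: acc) (by simp at hf; omega)]
        simp
        omega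
      · have hpre : [c].isPrefixOf (hd :: tl) = false := by simp [List.isPrefixOf, hc]
        rw [hpre]
        simp only [Bool.false_eq_true, if_false]
        rw [ih f (hd :: cur) acc (by simp at hf; omega)]
        simp [Ne.symm hc]

theorem splitOn_length_ge_two (c : Char) (s : List Char) (h : c ∈ s) :
    2 ≤ (PySem.Chars.splitOn s [c]).length := by
  unfold PySem.Chars.splitOn
  rw [splitOn_go_length c s (s.length + 1) [] [] (by omega)]
  have : 0 < s.count c := List.count_pos_iff.mpr h
  simp
  omega

theorem pyGet?_cons_cons_one {α : Type} (a b : α) (t : List α) :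
    PySem.List.pyGet? (a :: b :: t) 1 = some b := by
  have := PySem.List.pyGet?_natCast (a :: b :: t) 1
  simpa using this

theorem pyGet?_cons_zero {α : Type} (a : α) (t : List α) :
    PySem.List.pyGet? (a :: t) 0 = some a := by
  have := PySem.List.pyGet?_natCast (a :: t) 0
  simpa using this

-- the heart of the equivalence: scanning territory for owned slots within modular distance 1..5 of p0
-- equals trying the 5 offsets and striding through territory by 12
theorem core_scan_eq_stride (p0 : Nat) (terr : List Int) :
  ((PySem.List.enumerate terr 0).filterMap (fun p => if p.2 == (4:Int) then some p.1 else none)).any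
      (fun slot => decide (0 < PySem.Int.mod (slot - (p0:Int)) 12) && decide (PySem.Int.mod (slot - (p0:Int)) 12 ≤ 5))
  = (PySem.List.pyRange 1 6 1).any (fun off =>
      (PySem.List.pyRange (PySem.Int.mod ((p0:Int) + off) 12) (terr.length : Int) 12).any
        (fun slot => PySem.List.pyGet? terr slot == some (4:Int))) := by
  rw [Bool.eq_iff_iff]
  simp only [List.any_eq_true, List.mem_filterMap, PySem.List.mem_enumerate_iff,
    PySem.List.mem_pyRange_one, PySem.List.mem_pyRange_iff_of_pos (show (0:Int) < 12 by norm_num),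
    PySem.Int.mod_eq_emod_of_pos (show (0:Int) < 12 by norm_num),
    Bool.and_eq_true, decide_eq_true_eq, beq_iff_eq]
  constructor
  · rintro ⟨x, ⟨a, ⟨k, hk, rfl⟩, ha⟩, h1, h2⟩
    simp only [] at ha
    by_cases h4 : terr[k] = (4:Int)
    · rw [if_pos h4] at ha
      obtain rfl : (0:Int) + (k:Int) = x := Option.some.inj ha
      refine ⟨((k:Int) - (p0:Int)) % 12, by omega, (k:Int), by omega, ?_⟩
      rw [PySem.List.pyGet?_natCast]
      simp [List.getElem?_eq_getElem hk, h4]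
    · rw [if_neg h4] at ha; exact absurd ha (by simp)
  · rintro ⟨off, ⟨h1off, h2off⟩, slot, ⟨hle, hlt, hdvd⟩, hget⟩
    have hstart : (0:Int) ≤ ((p0:Int) + off) % 12 := Int.emod_nonneg _ (by norm_num)
    have hslot0 : (0:Int) ≤ slot := le_trans hstart hle
    obtain ⟨k, rfl⟩ : ∃ k : Nat, slot = (k:Int) := ⟨slot.toNat, (Int.toNat_of_nonneg hslot0).symm⟩
    rw [PySem.List.pyGet?_natCast] at hget
    have hklen : k < terr.length := by exact_mod_cast hlt
    have h4 : terr[k] = (4:Int) := by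
      have := List.getElem?_eq_getElem hklen
      rw [this] at hget; exact Option.some.inj hget
    refine ⟨(k:Int), ⟨(0 + (k:Int), terr[k]), ⟨k, hklen, rfl⟩, by simp [h4]⟩, by omega, by omega⟩

-- ===== VERDICT (by name: the statement is the Claim_ definition above) =====
theorem check_two_letter_constraint_viability_spec : Claim_equal_check_two_letter_constraint_viability := by
  intro constraint state territory _ hpre
  unfold Spec_check_two_letter_constraint_viability
  unfold check_two_letter_constraint_viability check_two_letter_constraint_viability_alt
  have hlen : 2 ≤ (PySem.Chars.splitOn constraint.toList ['<']).length :=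
    splitOn_length_ge_two '<' constraint.toList hpre
  obtain ⟨p, q, rest, hsplit⟩ :
      ∃ p q rest, PySem.Chars.splitOn constraint.toList ['<'] = p :: q :: rest := by
    rcases h : PySem.Chars.splitOn constraint.toList ['<'] with _ | ⟨p, _ | ⟨q, rest⟩⟩
    · rw [h] at hlen; simp at hlen
    · rw [h] at hlen; simp at hlen
    · exact ⟨p, q, rest, rfl⟩
  rw [hsplit]
  simp only [List.map_cons, pyGet?_cons_cons_one, pyGet?_cons_zero]
  cases hb : state.contains (String.ofList q) with
  | true =>
    -- second letter already on the board: both sides return False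
    obtain ⟨kb, hkb⟩ : ∃ kb, PySem.List.index? state (String.ofList q) = some kb :=
      Option.isSome_iff_exists.mp
        ((PySem.List.index?_isSome_iff _ _).mpr (List.contains_iff_mem.mp hb))
    rw [hkb]
    simp only [Bool.true_or]
    rfl
  | false =>
    cases ha : state.contains (String.ofList p) with
    | false =>
      -- first letter not on the board either: both sides return False
      simp only [Bool.false_or, Bool.not_false]
      rfl
    | true =>
      -- the interesting case: A scans, B strides
      obtain ⟨ka, hka⟩ : ∃ ka, PySem.List.index? state (String.ofList p) = some ka :=
        Option.isSome_iff_exists.mp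
          ((PySem.List.index?_isSome_iff _ _).mpr (List.contains_iff_mem.mp ha))
      rw [hka]
      simp only [Bool.not_true, Bool.false_or]
      exact core_scan_eq_stride ka territory
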